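-- pv_equiv track=rewrite | github.com/kagrin97/Python-algorithm | python/프로그래머스/Level-3/최고의 집합.py | solution
-- ===== SOURCE A (Python) =====
-- def solution(n, s):
--     if n > s:
--         return [-1]
--     [even, again] = divmod(s, n)
--     answer = [even] * n
--
--     for i in range(again):
--         answer[i] += 1
--     return sorted(answer)
-- ===== SOURCE B (Python) =====
-- def solution(n, s):
--     if n > s:
--         return [-1]
--     out = []
--     while n > 0:
--         x = s // n          # smallest element of a balanced split of s into n parts
--         out.append(x)
--         s -= x
--         n -= 1
--     return out
-- ===== Notes on version B (the rewrite author's own statement) =====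
-- stated objective: alternative
-- what changed: B replaces A's divmod split, [even]*n list build, per-index increment loop and final sort with a single greedy loop that repeatedly emits s//n as the next (smallest) element and recurses on the remainder, producing the sorted answer directly with no sort and no list mutation.
import Mathlib
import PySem

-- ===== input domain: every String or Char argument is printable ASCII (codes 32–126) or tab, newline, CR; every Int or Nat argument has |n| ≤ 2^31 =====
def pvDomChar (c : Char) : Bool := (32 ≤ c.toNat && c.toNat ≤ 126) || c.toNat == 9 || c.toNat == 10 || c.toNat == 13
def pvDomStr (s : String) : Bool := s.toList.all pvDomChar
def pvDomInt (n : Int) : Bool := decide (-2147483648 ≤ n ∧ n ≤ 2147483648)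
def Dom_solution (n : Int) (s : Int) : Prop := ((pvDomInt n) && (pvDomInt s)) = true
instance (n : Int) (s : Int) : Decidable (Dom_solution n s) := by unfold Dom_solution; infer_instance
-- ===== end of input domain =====

-- B replaces A's split-increment-sort (divmod, [even]*n, per-index increments, sorted) with a greedy loop that
-- repeatedly emits s // n (the least element of a balanced split) and recurses on the remainder; alternative algorithm, no sort.


-- ===== PORT A =====
def solution (n : Int) (s : Int) : List Int :=
  if n > s then [-1]
  else
    match PySem.Int.divmod? s n with
    | none => []  -- unreachable inside Pre_solution: Python raises ZeroDivisionError here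
    | some (even, again) =>
      let answer := PySem.List.pyRepeat [even] n
      -- for i in range(again): answer[i] += 1  (every i is in range: 0 ≤ i < again ≤ len(answer))
      let answer := (PySem.List.pyRange 0 again 1).foldl
        (fun acc i => acc.set i.toNat (acc.getD i.toNat 0 + 1)) answer
      PySem.List.sorted answer (fun x => x) false

-- ===== PORT B =====
-- the 'while n > 0' loop of Source B: emit s // n, subtract it from s, decrement n
def solutionAltLoop (n : Int) (s : Int) : List Int :=
  if n > 0 then
    let x := PySem.Int.floordiv s n
    x :: solutionAltLoop (n - 1) (s - x)
  else []
termination_by n.toNat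
decreasing_by omega

def solution_alt (n : Int) (s : Int) : List Int :=
  if n > s then [-1]
  else solutionAltLoop n s

-- ===== PRECONDITION & SPEC =====
-- Pre_ excludes exactly the inputs where A raises ZeroDivisionError (n = 0 and 0 ≤ s).
def Pre_solution (n : Int) (s : Int) : Prop := n = 0 → s < 0
instance (n : Int) (s : Int) : Decidable (Pre_solution n s) := by unfold Pre_solution; infer_instance
def pvWitness_solution : Int × Int := (3, 10)

def Spec_solution (n : Int) (s : Int) (out : List Int) : Prop := out = solution_alt n s
instance (n : Int) (s : Int) (out : List Int) : Decidable (Spec_solution n s out) := by unfold Spec_solution; infer_instance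

-- ===== CLAIM (what is proved, stated in full; the proofs are below) =====
def Claim_equal_solution : Prop := ∀ (n : Int) (s : Int), Dom_solution n s → Pre_solution n s → Spec_solution n s (solution n s)

-- ===== LEMMAS AND PROOFS =====

-- A's increment loop on [v]*m turns the first k entries into v+1.
theorem incLoop (k m : Nat) (v : Int) (h : k ≤ m) :
    (PySem.List.pyRange 0 (k : Int) 1).foldl
      (fun acc i => acc.set i.toNat (acc.getD i.toNat 0 + 1)) (List.replicate m v)
    = List.replicate k (v + 1) ++ List.replicate (m - k) v := by
  induction k with
  | zero => simp [PySem.List.pyRange_one_eq_nil]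
  | succ k ih =>
    have hk : (0 : Int) ≤ (k : Int) := by positivity
    have : ((k + 1 : Nat) : Int) = (k : Int) + 1 := by push_cast; ring
    rw [this, PySem.List.pyRange_one_succ_right hk, List.foldl_append, ih (by omega)]
    simp only [List.foldl_cons, List.foldl_nil, Int.toNat_natCast]
    have hrest : m - k = (m - (k + 1)) + 1 := by omega
    rw [hrest]
    have hget : (List.replicate k (v + 1) ++ List.replicate (m - (k + 1) + 1) v).getD k 0 = v := by
      rw [List.getD_eq_getElem?_getD, List.getElem?_append_right (by simp)]
      simp
    rw [hget]
    rw [List.set_append_right _ _ (by simp)]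
    simp only [List.length_replicate, Nat.sub_self, List.replicate_succ, List.set_cons_zero]
    rw [List.append_cons, ← List.replicate_succ', List.replicate_succ, List.cons_append]

-- A's value in canonical form: (n-r) copies of q, then r copies of q+1.
theorem A_canon (n s : Int) (hpos : 0 < n) (hle : n ≤ s) :
    solution n s
    = List.replicate (n - PySem.Int.mod s n).toNat (PySem.Int.floordiv s n)
      ++ List.replicate (PySem.Int.mod s n).toNat (PySem.Int.floordiv s n + 1) := by
  have hns : ¬ n > s := by omega
  have hn0 : n ≠ 0 := by omega
  unfold solution
  simp only [hns, if_false]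
  have hdm : PySem.Int.divmod? s n = some (PySem.Int.floordiv s n, PySem.Int.mod s n) := by
    simp [PySem.Int.divmod?, PySem.Int.floordiv, PySem.Int.mod, hn0]
  rw [hdm]
  set q := PySem.Int.floordiv s n
  set r := PySem.Int.mod s n
  have hr0 : 0 ≤ r := PySem.Int.mod_nonneg s hpos
  have hrn : r < n := PySem.Int.mod_lt s hpos
  have hcast : (r.toNat : Int) = r := Int.toNat_of_nonneg hr0
  simp only [PySem.List.pyRepeat_singleton]
  rw [← hcast, incLoop r.toNat n.toNat q (by omega), hcast]
  have hnr : (n - r).toNat = n.toNat - r.toNat := by omega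
  rw [hnr]
  apply PySem.List.sorted_id_eq_of_perm_of_pairwise
  · exact List.perm_append_comm
  · rw [List.pairwise_append]
    refine ⟨List.pairwise_replicate.mpr (Or.inr le_rfl),
      List.pairwise_replicate.mpr (Or.inr le_rfl), ?_⟩
    intro a ha b hb
    rw [List.eq_of_mem_replicate ha, List.eq_of_mem_replicate hb]
    omega

-- Uniqueness of floor quotient for a positive divisor.
theorem floordiv_of_decomp (s n q r : Int) (hpos : 0 < n) (hr0 : 0 ≤ r) (hrn : r < n)
    (hs : s = n * q + r) : PySem.Int.floordiv s n = q := by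
  rw [PySem.Int.floordiv_eq_iff_of_pos hpos]
  constructor <;> nlinarith

-- B's greedy loop produces the canonical form: when s = (m+1)*q + r with 0 ≤ r ≤ m,
-- the loop emits (m+1-r) copies of q followed by r copies of q+1.
theorem B_canon (m : Nat) : ∀ (s q r : Int), 0 ≤ r → r < (m : Int) + 1 →
    s = ((m : Int) + 1) * q + r →
    solutionAltLoop ((m : Int) + 1) s
    = List.replicate ((m : Int) + 1 - r).toNat q ++ List.replicate r.toNat (q + 1) := by
  induction m with
  | zero =>
    intro s q r hr0 hrn hs
    have hr : r = 0 := by omega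
    subst hr
    have hx : PySem.Int.floordiv s 1 = q :=
      floordiv_of_decomp s 1 q 0 one_pos le_rfl one_pos (by push_cast at hs; omega)
    rw [solutionAltLoop.eq_def]
    norm_num [hx]
    rw [solutionAltLoop.eq_def]
    norm_num
    push_cast at hs
    omega
  | succ k ih =>
    intro s q r hr0 hrn hs
    have hpos : (0 : Int) < (k : Int) + 1 + 1 := by positivity
    rw [solutionAltLoop]
    simp only [show ((k + 1 : Nat) : Int) = (k : Int) + 1 by push_cast; ring] at *
    have hx : PySem.Int.floordiv s ((k : Int) + 1 + 1) = q :=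
      floordiv_of_decomp s ((k : Int) + 1 + 1) q r hpos hr0 hrn (by linarith)
    simp only [hpos, if_true, hx]
    by_cases hcase : r < (k : Int) + 1
    · -- quotient and remainder unchanged for the tail
      rw [show (k : Int) + 1 + 1 - 1 = (k : Int) + 1 by ring,
        ih (s - q) q r hr0 hcase (by linarith)]
      have h1 : ((k : Int) + 1 + 1 - r).toNat = ((k : Int) + 1 - r).toNat + 1 := by omega
      rw [h1, List.replicate_succ, List.cons_append]
    · -- r = k + 1 : the tail has quotient q+1 and remainder 0
      have hreq : r = (k : Int) + 1 := by omega
      rw [show (k : Int) + 1 + 1 - 1 = (k : Int) + 1 by ring,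
        ih (s - q) (q + 1) 0 le_rfl (by positivity) (by rw [hreq] at hs; linarith)]
      have h1 : ((k : Int) + 1 + 1 - r).toNat = 1 := by omega
      have h2 : ((k : Int) + 1 - 0).toNat = r.toNat := by omega
      simp [h1]
      omega

theorem solution_spec : Claim_equal_solution := by
  intro n s _ hpre
  unfold Spec_solution solution_alt
  by_cases hns : n > s
  · simp [solution, hns]
  · simp only [hns, if_false]
    have hn0 : n ≠ 0 := by
      intro h; subst h; exact absurd (hpre rfl) (by omega)
    rcases lt_or_gt_of_ne hn0 with hneg | hpos
    · -- n < 0 : A returns the sort of an empty list, B's loop never runs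
      have hb := PySem.Int.mod_neg_bounds s hneg
      unfold solution
      simp only [hns, if_false]
      have hdm : PySem.Int.divmod? s n = some (PySem.Int.floordiv s n, PySem.Int.mod s n) := by
        simp [PySem.Int.divmod?, PySem.Int.floordiv, PySem.Int.mod, hn0]
      rw [hdm, solutionAltLoop]
      have h1 : n.toNat = 0 := by omega
      simp [PySem.List.pyRepeat_singleton, h1, show ¬ n > 0 by omega,
        PySem.List.pyRange_one_eq_nil (by omega : PySem.Int.mod s n ≤ 0), PySem.List.sorted]
    · -- n > 0
      have hle : n ≤ s := by omega
      set q := PySem.Int.floordiv s n with hq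
      set r := PySem.Int.mod s n with hr
      have hr0 : 0 ≤ r := PySem.Int.mod_nonneg s hpos
      have hrn : r < n := PySem.Int.mod_lt s hpos
      have hs : s = n * q + r := by
        have h := PySem.Int.floordiv_mul_add_mod s n
        rw [← h]; ring
      have hm : n = ((n.toNat - 1 : Nat) : Int) + 1 := by omega
      rw [A_canon n s hpos hle, ← hq, ← hr, hm,
        B_canon (n.toNat - 1) s q r hr0 (by omega) (by rw [← hm]; exact hs)]
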